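-- pv_equiv track=rewrite | github.com/viktorb1/leetcode | 36-valid-sudoku/36-valid-sudoku.py | checkThreeByThree
-- ===== SOURCE A (Python) =====
-- def checkThreeByThree(grid):
--     nums = set(list('0123456789'))
--     seen = set()
--
--     for i in range(len(grid)):
--         for j in range(len(grid[0])):
--             if grid[i][j] in nums:
--                 if grid[i][j] in seen:
--                     return False
--                 else:
--                     seen.add(grid[i][j])
--
--     return True
-- ===== SOURCE B (Python) =====
-- def checkThreeByThree(grid):
--     nums = set('0123456789')
--     width = len(grid[0]) if grid else 0
--     digits = sorted(c for row in grid for c in row[:width] if c in nums)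
--     return all(a != b for a, b in zip(digits, digits[1:]))
-- ===== Notes on version B (the rewrite author's own statement) =====
-- stated objective: alternative
-- what changed: Replaces the incremental seen-set scan with early return by a sort-based uniqueness test: collect the digit entries of the first len(grid[0]) columns, sort them, and check that no two adjacent sorted entries are equal.
import Mathlib
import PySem

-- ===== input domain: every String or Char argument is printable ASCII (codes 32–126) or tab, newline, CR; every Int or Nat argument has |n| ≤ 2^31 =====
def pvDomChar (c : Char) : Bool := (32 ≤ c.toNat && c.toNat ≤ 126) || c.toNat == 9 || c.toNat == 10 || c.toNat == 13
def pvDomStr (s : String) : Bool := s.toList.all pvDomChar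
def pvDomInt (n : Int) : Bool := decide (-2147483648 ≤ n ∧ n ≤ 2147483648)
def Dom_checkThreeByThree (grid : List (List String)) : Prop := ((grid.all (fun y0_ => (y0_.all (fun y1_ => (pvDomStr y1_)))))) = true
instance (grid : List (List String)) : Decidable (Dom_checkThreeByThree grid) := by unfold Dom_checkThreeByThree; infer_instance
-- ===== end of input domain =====

-- B replaces A's incremental seen-set scan by a sort-based uniqueness test:
-- gather the digit entries of the first len(grid[0]) columns, sort them, and
-- check that no two adjacent sorted entries are equal.

-- set(list('0123456789')) — the ten one-character digit strings (shared constant of both ports)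
def pvNums : List String := ["0", "1", "2", "3", "4", "5", "6", "7", "8", "9"]

-- ===== PORT A =====
-- inner loop: for j in range(len(grid[0])): membership tests and early `return False` (= none)
def pvInnerA (row : List String) : List Nat → PySem.Set String → Option (PySem.Set String)
  | [], seen => some seen
  | j :: js, seen =>
    let x := row.getD j ""
    if pvNums.contains x then
      if PySem.Set.contains seen x then none
      else pvInnerA row js (PySem.Set.add seen x)
    else pvInnerA row js seen

-- outer loop: for i in range(len(grid)), threading `seen`; an inner `return False` aborts everything
def pvOuterA (grid : List (List String)) (w : Nat) : List Nat → PySem.Set String → Bool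
  | [], _ => true
  | i :: is, seen =>
    match pvInnerA (grid.getD i []) (List.range w) seen with
    | none => false
    | some s => pvOuterA grid w is s

def checkThreeByThree (grid : List (List String)) : Bool :=
  pvOuterA grid (grid.headD []).length (List.range grid.length) PySem.Set.empty

-- ===== PORT B =====
-- digits = sorted(c for row in grid for c in row[:width] if c in nums); row[:width] with
-- width ≥ 0 is row.take width (exact for a nonnegative bound); zip(digits, digits[1:]) is
-- digits.zip (digits.drop 1); all(a != b for …) is .all with !=
def checkThreeByThree_alt (grid : List (List String)) : Bool :=
  let width := (grid.headD []).length
  let digits := PySem.List.sorted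
      (grid.flatMap (fun row => (row.take width).filter (fun c => pvNums.contains c)))
      (fun x => x) false
  (digits.zip (digits.drop 1)).all (fun p => p.1 != p.2)

-- ===== PRECONDITION & SPEC =====
-- the digit entries A processes before its first out-of-range access: full-width slices of the
-- rows before the first short row, then the whole first short row
def pvDigitsBeforeCrash (grid : List (List String)) : List String :=
  let width := (grid.headD []).length
  (grid.takeWhile (fun r => width ≤ r.length)).flatMap
      (fun r => (r.take width).filter (fun c => pvNums.contains c))
    ++ ((grid.dropWhile (fun r => width ≤ r.length)).headD []).filter (fun c => pvNums.contains c)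

-- Pre_ excludes exactly the grids on which Python A raises IndexError: ragged grids (some row
-- shorter than row 0) whose digit entries before the first missing cell are all distinct
-- (a duplicate among those entries makes A return False before it reaches the missing cell).
def Pre_checkThreeByThree (grid : List (List String)) : Prop :=
  (∀ r ∈ grid, (grid.headD []).length ≤ r.length) ∨ ¬ (pvDigitsBeforeCrash grid).Nodup
instance (grid : List (List String)) : Decidable (Pre_checkThreeByThree grid) := by
  unfold Pre_checkThreeByThree; infer_instance

def pvWitness_checkThreeByThree : List (List String) := [["5", "x"], ["x", "7"]]

def Spec_checkThreeByThree (grid : List (List String)) (out : Bool) : Prop := out = checkThreeByThree_alt grid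
instance (grid : List (List String)) (out : Bool) : Decidable (Spec_checkThreeByThree grid out) := by unfold Spec_checkThreeByThree; infer_instance

-- ===== CLAIM (what is proved, stated in full; the proofs are below) =====
def Claim_equal_checkThreeByThree : Prop := ∀ (grid : List (List String)), Dom_checkThreeByThree grid → Pre_checkThreeByThree grid → Spec_checkThreeByThree grid (checkThreeByThree grid)

-- ===== LEMMAS AND PROOFS =====

-- abstract form of A's traversal: scan a flat list with a seen-set and early failure
def pvScan : List String → PySem.Set String → Bool
  | [], _ => true
  | x :: xs, seen =>
    if PySem.Set.contains seen x then false else pvScan xs (PySem.Set.add seen x)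

theorem pvInnerA_eq (row : List String) :
    ∀ (js : List Nat) (seen : PySem.Set String),
    pvInnerA row js seen =
      (if pvScan (js.filterMap (fun j =>
          let x := row.getD j ""
          if pvNums.contains x then some x else none)) seen
       then some ((js.filterMap (fun j =>
          let x := row.getD j ""
          if pvNums.contains x then some x else none)).foldl PySem.Set.add seen)
       else none) := by
  intro js
  induction js with
  | nil => intro seen; simp [pvInnerA, pvScan]
  | cons j js ih =>
    intro seen
    by_cases hn : row[j]?.getD "" ∈ pvNums
    · by_cases hs : row[j]?.getD "" ∈ seen
      · simp [pvInnerA, pvScan, PySem.Set.contains, List.getD, hn, hs]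
      · simp [pvInnerA, pvScan, PySem.Set.contains, List.getD, hn, hs, ih]
    · simp [pvInnerA, List.getD, hn, ih]

theorem pvScan_append (l₁ l₂ : List String) :
    ∀ seen, pvScan (l₁ ++ l₂) seen =
      (if pvScan l₁ seen then pvScan l₂ (l₁.foldl PySem.Set.add seen) else false) := by
  induction l₁ with
  | nil => intro seen; simp [pvScan]
  | cons x xs ih =>
    intro seen
    by_cases hs : x ∈ seen
    · simp [pvScan, PySem.Set.contains, hs]
    · simp [pvScan, PySem.Set.contains, hs, ih]

theorem pvOuterA_eq (grid : List (List String)) (w : Nat) :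
    ∀ (is : List Nat) (seen : PySem.Set String),
    pvOuterA grid w is seen = pvScan (is.flatMap (fun i =>
      (List.range w).filterMap (fun j =>
        let x := (grid.getD i []).getD j ""
        if pvNums.contains x then some x else none))) seen := by
  intro is
  induction is with
  | nil => intro seen; simp [pvOuterA, pvScan]
  | cons i is ih =>
    intro seen
    rw [List.flatMap_cons, pvScan_append]
    show (match pvInnerA (grid.getD i []) (List.range w) seen with
          | none => false
          | some s => pvOuterA grid w is s) = _
    rw [pvInnerA_eq (grid.getD i []) (List.range w) seen]
    cases hb : pvScan ((List.range w).filterMap (fun j =>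
        let x := (grid.getD i []).getD j ""
        if pvNums.contains x then some x else none)) seen
    · simp only [if_false, Bool.false_eq_true]
    · simp only [if_true]
      exact ih _

-- the inner index loop's digit stream is a filter of the truncated row ("" is not a digit)
theorem pvInnerStream_eq (row : List String) :
    ∀ (w : Nat),
    (List.range w).filterMap (fun j =>
        let x := row.getD j ""
        if pvNums.contains x then some x else none)
      = (row.take w).filter (fun c => pvNums.contains c) := by
  induction row with
  | nil =>
    intro w
    have h : ("" : String) ∉ pvNums := by decide
    simp [List.getD, h]
  | cons x xs ih =>
    intro w
    cases w with
    | zero => simp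
    | succ w =>
      rw [List.range_succ_eq_map, List.filterMap_cons, List.filterMap_map]
      have hcomp : ((fun j =>
          let y := (x :: xs).getD j ""
          if pvNums.contains y then some y else none) ∘ Nat.succ)
          = (fun j =>
          let y := xs.getD j ""
          if pvNums.contains y then some y else none) := by
        funext j; simp [List.getD]
      rw [hcomp, ih w]
      by_cases hx : x ∈ pvNums
      · simp [List.getD, hx]
      · simp [List.getD, hx]

-- iterating i over range(len(grid)) with grid[i] is iterating over the rows
theorem pvRowStream_eq (f : List String → List String) :
    ∀ (grid : List (List String)),
    (List.range grid.length).flatMap (fun i => f (grid.getD i []))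
      = grid.flatMap f := by
  intro grid
  induction grid with
  | nil => simp
  | cons g gs ih =>
    rw [List.length_cons, List.range_succ_eq_map, List.flatMap_cons, List.flatMap_map]
    simp only [List.getD, List.getElem?_cons_succ, List.getElem?_cons_zero, Option.getD_some,
      List.flatMap_cons]
    exact congrArg _ ih

theorem pvScan_iff_nodup (l : List String) :
    ∀ seen : PySem.Set String,
    pvScan l seen = true ↔ l.Nodup ∧ ∀ x ∈ l, x ∉ seen := by
  induction l with
  | nil => intro seen; simp [pvScan]
  | cons x xs ih =>
    intro seen
    by_cases hs : x ∈ seen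
    · have hc : PySem.Set.contains seen x = true := by
        simpa [PySem.Set.contains_iff] using hs
      simp only [pvScan, hc, if_true, Bool.false_eq_true, false_iff]
      rintro ⟨-, h⟩
      exact (h x (List.mem_cons_self)) hs
    · have hc : PySem.Set.contains seen x = false := by
        simp [PySem.Set.contains]; simpa using hs
      rw [pvScan]
      simp only [hc, Bool.false_eq_true, if_false, ih, PySem.Set.mem_add, List.nodup_cons,
        List.mem_cons]
      constructor
      · rintro ⟨hnd, h⟩
        exact ⟨⟨fun hx => (h x hx (Or.inr rfl)), hnd⟩,
          fun y hy => hy.elim (fun he => he ▸ hs) (fun hy' hm => h y hy' (Or.inl hm))⟩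
      · rintro ⟨⟨hxxs, hnd⟩, h⟩
        refine ⟨hnd, fun y hy hmem => ?_⟩
        cases hmem with
        | inl hmem => exact h y (Or.inr hy) hmem
        | inr he => exact hxxs (he ▸ hy)

-- adjacent-pairs-all-distinct is Chain' (· ≠ ·)
theorem pvAdj_iff_chain (l : List String) :
    ((l.zip (l.drop 1)).all (fun p => p.1 != p.2) = true) ↔ l.IsChain (· ≠ ·) := by
  induction l with
  | nil => simp
  | cons a l ih =>
    cases l with
    | nil => simp
    | cons b t =>
      rw [List.drop_one, List.tail_cons, List.zip_cons_cons, List.all_cons,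
        List.isChain_cons_cons, ← ih]
      simp

theorem pvChain_lt (l : List String) :
    l.Pairwise (· ≤ ·) → l.IsChain (· ≠ ·) → l.IsChain (· < ·) := by
  induction l with
  | nil => intro _ _; exact List.isChain_nil
  | cons a l ih =>
    intro hp hc
    cases l with
    | nil => exact List.isChain_singleton a
    | cons b t =>
      rw [List.isChain_cons_cons] at hc ⊢
      rw [List.pairwise_cons] at hp
      exact ⟨lt_of_le_of_ne (hp.1 b (List.mem_cons_self)) hc.1, ih hp.2 hc.2⟩

-- for a ≤-sorted list, adjacent distinctness is Nodup
theorem pvSortedChain_iff_nodup (l : List String) (hp : l.Pairwise (· ≤ ·)) :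
    l.IsChain (· ≠ ·) ↔ l.Nodup := by
  constructor
  · intro hc
    have hlt : l.Pairwise (· < ·) := List.isChain_iff_pairwise.mp (pvChain_lt l hp hc)
    exact hlt.imp (fun h => ne_of_lt h)
  · intro hnd
    exact List.Pairwise.isChain hnd

theorem pvScan_empty_eq (l : List String) :
    pvScan l PySem.Set.empty = decide l.Nodup := by
  rw [Bool.eq_iff_iff, pvScan_iff_nodup, decide_eq_true_iff]
  simp [PySem.Set.empty]

-- ===== VERDICT (by name: the statements are the Claim_ definitions above) =====
theorem checkThreeByThree_spec : Claim_equal_checkThreeByThree := by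
  intro grid _ _
  unfold Spec_checkThreeByThree checkThreeByThree checkThreeByThree_alt
  rw [pvOuterA_eq]
  simp only [pvInnerStream_eq]
  rw [pvRowStream_eq (fun row =>
    (row.take (grid.headD []).length).filter (fun c => pvNums.contains c)) grid,
    pvScan_empty_eq]
  rw [Bool.eq_iff_iff, decide_eq_true_iff, pvAdj_iff_chain,
    pvSortedChain_iff_nodup _ (PySem.List.sorted_pairwise _ _),
    (PySem.List.sorted_perm _ _ _).nodup_iff]
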